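-- pv_equiv track=rewrite | github.com/QDucasse/Mini_MIPS | src/hex_encoder.py | compute_hex_instructions
-- ===== SOURCE A (Python) =====
-- def compute_hex_instructions(numInstructions):
--
--     hexInstructions = []
--
--     for numInstr in numInstructions:
--         decInstr = 0
--         instrCode = numInstr[0]
--         decInstr += numInstr[0] << 27
--
--         if (instrCode>0)&(instrCode<15):      #All Binary instructions
--             decInstr += numInstr[1] << 22        #regAlpha
--             decInstr += numInstr[2] << 21        #imm
--             decInstr += numInstr[3] << 5         #o
--             decInstr += numInstr[4]              #regBeta
--
--         elif ((instrCode)==15):                 #jmp instruction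
--             decInstr += numInstr[1] << 26        #imm
--             decInstr += numInstr[2] << 5         #o
--             decInstr += numInstr[3]              #regBeta
--
--         elif (instrCode==16)|(instrCode==17): #braz/branz instructions
--             decInstr += numInstr[1] << 22        #regAlpha
--             decInstr += numInstr[2]              #a
--
--         elif (instrCode==18):                  #scall instruction
--             decInstr += numInstr[1]              #n
--
--         hexInstructions.append(hex(decInstr))
--
--     return hexInstructions
-- ===== SOURCE B (Python) =====
-- # Data-driven rewrite: a static opcode -> [(field_index, shift)] table replaces the if/elif chain.
-- _TABLE = {c: [(1, 22), (2, 21), (3, 5), (4, 0)] for c in range(1, 15)}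
-- _TABLE[15] = [(1, 26), (2, 5), (3, 0)]
-- _TABLE[16] = [(1, 22), (2, 0)]
-- _TABLE[17] = [(1, 22), (2, 0)]
-- _TABLE[18] = [(1, 0)]
--
--
-- def compute_hex_instructions(numInstructions):
--     hexInstructions = []
--     for numInstr in numInstructions:
--         decInstr = numInstr[0] << 27
--         for idx, shift in _TABLE.get(numInstr[0], []):
--             decInstr += numInstr[idx] << shift
--         hexInstructions.append(hex(decInstr))
--     return hexInstructions
-- ===== Notes on version B (the rewrite author's own statement) =====
-- stated objective: simpler
-- what changed: Replaces the four-way if/elif opcode dispatch with one static opcode -> [(field_index, shift)] table and a single data-driven inner loop accumulating numInstr[idx] << shift.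
-- outside the precondition, e.g. on compute_hex_instructions([[3, 1]]): A raises IndexError, B raises IndexError
import Mathlib
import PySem

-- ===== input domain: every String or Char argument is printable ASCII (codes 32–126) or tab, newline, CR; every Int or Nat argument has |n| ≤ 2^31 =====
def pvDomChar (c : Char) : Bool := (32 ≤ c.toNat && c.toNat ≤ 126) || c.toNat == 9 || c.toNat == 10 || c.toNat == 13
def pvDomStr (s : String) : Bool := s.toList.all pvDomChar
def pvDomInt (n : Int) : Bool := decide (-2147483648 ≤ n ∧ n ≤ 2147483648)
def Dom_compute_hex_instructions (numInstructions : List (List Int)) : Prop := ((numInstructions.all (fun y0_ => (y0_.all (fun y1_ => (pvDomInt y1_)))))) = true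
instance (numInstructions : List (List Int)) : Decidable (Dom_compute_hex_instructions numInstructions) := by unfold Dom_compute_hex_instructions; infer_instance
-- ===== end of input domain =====

-- B replaces A's if/elif opcode dispatch by a single static opcode -> (field index, shift) table
-- driving one data-driven inner loop (objective: simpler); return values agree wherever A returns.

-- shared helper: Python's hex(n) — '0x'/-'0x' + lowercase hex digits (Nat.toDigits 16 is exactly those digits)
def pyHex (n : Int) : String :=
  (if n < 0 then "-0x" else "0x") ++ String.ofList (Nat.toDigits 16 n.natAbs)

-- ===== PORT A =====
-- 'x << k' (k a nonneg literal) is ported as 'x * 2 ^ k' (exact); xs[i] under Pre_ as pyGetD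
def compute_hex_instructions (numInstructions : List (List Int)) : List String :=
  numInstructions.foldl (fun hexInstructions numInstr =>
    let decInstr : Int := 0
    let instrCode := PySem.List.pyGetD numInstr 0 0
    let decInstr := decInstr + (PySem.List.pyGetD numInstr 0 0) * 2 ^ 27
    let decInstr :=
      if instrCode > 0 ∧ instrCode < 15 then
        decInstr + (PySem.List.pyGetD numInstr 1 0) * 2 ^ 22
                 + (PySem.List.pyGetD numInstr 2 0) * 2 ^ 21
                 + (PySem.List.pyGetD numInstr 3 0) * 2 ^ 5
                 + (PySem.List.pyGetD numInstr 4 0)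
      else if instrCode = 15 then
        decInstr + (PySem.List.pyGetD numInstr 1 0) * 2 ^ 26
                 + (PySem.List.pyGetD numInstr 2 0) * 2 ^ 5
                 + (PySem.List.pyGetD numInstr 3 0)
      else if instrCode = 16 ∨ instrCode = 17 then
        decInstr + (PySem.List.pyGetD numInstr 1 0) * 2 ^ 22
                 + (PySem.List.pyGetD numInstr 2 0)
      else if instrCode = 18 then
        decInstr + (PySem.List.pyGetD numInstr 1 0)
      else decInstr
    hexInstructions ++ [pyHex decInstr]) []

-- ===== PORT B =====
-- Source B's module-level _TABLE, built the same way: a comprehension over range(1,15) then four assignments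
def pvTable : PySem.Dict Int (List (Nat × Nat)) :=
  ((((PySem.List.pyRange 1 15 1).foldl
      (fun d c => d.insert c [(1, 22), (2, 21), (3, 5), (4, 0)]) PySem.Dict.empty).insert
      15 [(1, 26), (2, 5), (3, 0)]).insert
      16 [(1, 22), (2, 0)]).insert 17 [(1, 22), (2, 0)] |>.insert 18 [(1, 0)]

def compute_hex_instructions_alt (numInstructions : List (List Int)) : List String :=
  numInstructions.foldl (fun hexInstructions numInstr =>
    let decInstr : Int := (PySem.List.pyGetD numInstr 0 0) * 2 ^ 27
    let decInstr := (pvTable.getD (PySem.List.pyGetD numInstr 0 0) []).foldl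
      (fun d p => d + (PySem.List.pyGetD numInstr (p.1 : Int) 0) * 2 ^ p.2) decInstr
    hexInstructions ++ [pyHex decInstr]) []

-- ===== PRECONDITION & SPEC =====
-- fields the opcode makes A read: 5 for 1..14, 4 for 15, 3 for 16/17, 2 for 18, 1 otherwise
def pvReqLen (c : Int) : Nat :=
  if 0 < c ∧ c < 15 then 5 else if c = 15 then 4 else if c = 16 ∨ c = 17 then 3
  else if c = 18 then 2 else 1

-- Pre_ excludes exactly the inputs where A raises IndexError: an instruction shorter than
-- the fields its opcode makes A read (headI [] = 0 forces nonemptiness via pvReqLen ≥ 1).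
def Pre_compute_hex_instructions (numInstructions : List (List Int)) : Prop :=
  ∀ instr ∈ numInstructions, pvReqLen instr.headI ≤ instr.length
instance (numInstructions : List (List Int)) : Decidable (Pre_compute_hex_instructions numInstructions) := by
  unfold Pre_compute_hex_instructions; infer_instance

def pvWitness_compute_hex_instructions : List (List Int) :=
  [[3, 1, 2, 3, 4], [15, 1, 2, 3], [16, 5, 6], [18, 7], [0], [19, 9]]

def Spec_compute_hex_instructions (numInstructions : List (List Int)) (out : List String) : Prop := out = compute_hex_instructions_alt numInstructions
instance (numInstructions : List (List Int)) (out : List String) : Decidable (Spec_compute_hex_instructions numInstructions out) := by unfold Spec_compute_hex_instructions; infer_instance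

-- ===== CLAIM (what is proved, stated in full; the proofs are below) =====
def Claim_equal_compute_hex_instructions : Prop := ∀ (numInstructions : List (List Int)), Dom_compute_hex_instructions numInstructions → Pre_compute_hex_instructions numInstructions → Spec_compute_hex_instructions numInstructions (compute_hex_instructions numInstructions)

-- ===== LEMMAS AND PROOFS =====
set_option maxHeartbeats 2000000

theorem getD_foldl_insert_const (v : List (Nat × Nat)) (ks : List Int)
    (d : PySem.Dict Int (List (Nat × Nat))) (c : Int) :
    (ks.foldl (fun d k => d.insert k v) d).getD c [] =
      if c ∈ ks then v else d.getD c [] := by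
  induction ks generalizing d with
  | nil => simp
  | cons k ks ih =>
    simp only [List.foldl_cons, ih, PySem.Dict.getD_insert, List.mem_cons]
    by_cases hk : c ∈ ks <;> by_cases hc : c = k <;> simp [hk, hc]

theorem pvTable_getD (c : Int) :
    pvTable.getD c [] =
      (if 0 < c ∧ c < 15 then [((1:Nat), (22:Nat)), (2, 21), (3, 5), (4, 0)]
       else if c = 15 then [(1, 26), (2, 5), (3, 0)]
       else if c = 16 ∨ c = 17 then [(1, 22), (2, 0)]
       else if c = 18 then [(1, 0)] else []) := by
  unfold pvTable
  simp only [PySem.Dict.getD_insert, getD_foldl_insert_const, PySem.List.mem_pyRange_one,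
    PySem.Dict.getD_empty]
  split_ifs <;> first | rfl | omega

theorem body_eq (acc : List String) (numInstr : List Int) :
    (fun hexInstructions numInstr =>
      let decInstr : Int := 0
      let instrCode := PySem.List.pyGetD numInstr 0 0
      let decInstr := decInstr + (PySem.List.pyGetD numInstr 0 0) * 2 ^ 27
      let decInstr :=
        if instrCode > 0 ∧ instrCode < 15 then
          decInstr + (PySem.List.pyGetD numInstr 1 0) * 2 ^ 22
                   + (PySem.List.pyGetD numInstr 2 0) * 2 ^ 21
                   + (PySem.List.pyGetD numInstr 3 0) * 2 ^ 5
                   + (PySem.List.pyGetD numInstr 4 0)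
        else if instrCode = 15 then
          decInstr + (PySem.List.pyGetD numInstr 1 0) * 2 ^ 26
                   + (PySem.List.pyGetD numInstr 2 0) * 2 ^ 5
                   + (PySem.List.pyGetD numInstr 3 0)
        else if instrCode = 16 ∨ instrCode = 17 then
          decInstr + (PySem.List.pyGetD numInstr 1 0) * 2 ^ 22
                   + (PySem.List.pyGetD numInstr 2 0)
        else if instrCode = 18 then
          decInstr + (PySem.List.pyGetD numInstr 1 0)
        else decInstr
      hexInstructions ++ [pyHex decInstr]) acc numInstr =
    (fun hexInstructions numInstr =>
      let decInstr : Int := (PySem.List.pyGetD numInstr 0 0) * 2 ^ 27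
      let decInstr := (pvTable.getD (PySem.List.pyGetD numInstr 0 0) []).foldl
        (fun d p => d + (PySem.List.pyGetD numInstr (p.1 : Int) 0) * 2 ^ p.2) decInstr
      hexInstructions ++ [pyHex decInstr]) acc numInstr := by
  simp only [pvTable_getD]
  split_ifs <;> simp [List.foldl]

-- ===== VERDICT (by name: the statement is the Claim_ definition above) =====
theorem compute_hex_instructions_spec : Claim_equal_compute_hex_instructions := by
  intro l _ _
  unfold Spec_compute_hex_instructions compute_hex_instructions compute_hex_instructions_alt
  have hfun := funext fun acc => funext fun x => body_eq acc x
  rw [hfun]
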